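-- pv_equiv track=rewrite | github.com/UE-alicja-pegiel/drzewo_decyzyjne | przechowanie.py | liczba_wystapien_decyzyjnych
-- ===== SOURCE A (Python) =====
-- def liczba_wystapien_decyzyjnych(tab: list) -> dict:
--     """
--     :param tab: lista składająca się z atrybutów (a1, a2, ..., d), gdzie d to atrybut decyzyjny
--     :return: słownik wystąpień wartości atrybutów decyzyjnych dla poszczególnych atrybutów
--     """
--     slownik = {}
--
--     for idx, element in enumerate(tab[:len(tab)-1]):
--         elementy = {i: {j: 0 for j in tab[-1]} for i in set(element)}
--         slownik["a"+f"{idx+1}"] = elementy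
--
--     for d in set(tab[-1]):
--         for i, element in enumerate(tab[:len(tab)-1]):
--             for idx, el in enumerate(tab[-1]):
--                 if el == d:
--                     slownik["a" + f"{i + 1}"][element[idx]][d] += 1
--     return slownik
-- ===== SOURCE B (Python) =====
-- def liczba_wystapien_decyzyjnych(tab: list) -> dict:
--     dec = tab[-1]
--     out = {}
--     for i, row in enumerate(tab[:-1]):
--         counts = {v: {d: 0 for d in dec} for v in dict.fromkeys(row)}
--         for v, d in zip(row, dec):
--             counts[v][d] += 1
--         out["a" + str(i + 1)] = counts
--     return out
-- ===== Notes on version B (the rewrite author's own statement) =====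
-- stated objective: alternative
-- what changed: A loops over every distinct decision value and, for each, rescans every attribute row against the whole decision row; B builds each row's count table in a single zip pass over (row, decision) pairs.
import Mathlib
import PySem

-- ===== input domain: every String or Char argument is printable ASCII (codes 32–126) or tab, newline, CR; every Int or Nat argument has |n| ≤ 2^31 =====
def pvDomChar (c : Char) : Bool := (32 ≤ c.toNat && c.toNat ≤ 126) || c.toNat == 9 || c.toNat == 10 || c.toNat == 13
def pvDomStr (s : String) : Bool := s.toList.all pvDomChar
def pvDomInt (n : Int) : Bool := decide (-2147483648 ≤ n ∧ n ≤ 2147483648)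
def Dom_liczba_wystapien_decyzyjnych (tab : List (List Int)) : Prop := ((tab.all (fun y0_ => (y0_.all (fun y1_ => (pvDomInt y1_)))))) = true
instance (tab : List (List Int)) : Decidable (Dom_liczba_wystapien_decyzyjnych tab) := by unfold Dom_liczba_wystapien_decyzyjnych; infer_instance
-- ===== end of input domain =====

-- B replaces A's triple loop (per distinct decision value × per attribute row × per column)
-- by one zip pass over (row, decision) pairs per attribute row (alternative algorithm, same value on Pre_).


-- ===== PORT A =====
def liczba_wystapien_decyzyjnych (tab : List (List Int)) : List (String × List (Int × List (Int × Int))) :=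
  let dec := (PySem.List.pyGet? tab (-1)).getD []          -- tab[-1]
  let head := PySem.List.slice tab none (some ((tab.length : Int) - 1))   -- tab[:len(tab)-1]
  let slownik : PySem.Dict String (PySem.Dict Int (PySem.Dict Int Int)) :=
    (PySem.List.enumerate head).foldl (fun s p =>
      s.insert ("a" ++ PySem.Int.toStr (p.1 + 1))
        ((PySem.Set.ofList p.2).foldl (fun e i =>
          e.insert i (dec.foldl (fun m j => m.insert j 0) PySem.Dict.empty)) PySem.Dict.empty))
      PySem.Dict.empty
  let slownik :=
    (PySem.Set.ofList dec).foldl (fun s d =>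
      (PySem.List.enumerate head).foldl (fun s q =>
        (PySem.List.enumerate dec).foldl (fun s r =>
          if r.2 == d then
            s.modify ("a" ++ PySem.Int.toStr (q.1 + 1)) PySem.Dict.empty (fun m =>
              m.modify ((PySem.List.pyGet? q.2 r.1).getD 0) PySem.Dict.empty (fun mm =>
                mm.modify d 0 (· + 1)))
          else s) s) s) slownik
  slownik.items.map (fun p => (p.1, p.2.items.map (fun q => (q.1, q.2.items))))

-- ===== PORT B =====
def liczba_wystapien_decyzyjnych_alt (tab : List (List Int)) : List (String × List (Int × List (Int × Int))) :=
  let dec := (PySem.List.pyGet? tab (-1)).getD []          -- tab[-1]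
  let out : PySem.Dict String (PySem.Dict Int (PySem.Dict Int Int)) :=
    (PySem.List.enumerate (PySem.List.slice tab none (some (-1)))).foldl (fun o p =>
      let counts := (PySem.List.dedup p.2).foldl (fun c v =>
          c.insert v (dec.foldl (fun m d => m.insert d 0) PySem.Dict.empty)) PySem.Dict.empty
      let counts := (p.2.zip dec).foldl (fun c vd =>
          c.modify vd.1 PySem.Dict.empty (fun m => m.modify vd.2 0 (· + 1))) counts
      o.insert ("a" ++ PySem.Int.toStr (p.1 + 1)) counts) PySem.Dict.empty
  out.items.map (fun p => (p.1, p.2.items.map (fun q => (q.1, q.2.items))))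

-- ===== PRECONDITION & SPEC =====
-- Pre_ excludes exactly the inputs where the Python A raises IndexError: the empty list
-- (tab[-1]) and inputs where some attribute row is shorter than the decision row (element[idx]).
def Pre_liczba_wystapien_decyzyjnych (tab : List (List Int)) : Prop :=
  tab ≠ [] ∧ ∀ row ∈ tab.dropLast, (tab.getLast?.getD []).length ≤ row.length
instance (tab : List (List Int)) : Decidable (Pre_liczba_wystapien_decyzyjnych tab) := by unfold Pre_liczba_wystapien_decyzyjnych; infer_instance

def pvWitness_liczba_wystapien_decyzyjnych : List (List Int) := [[1, 2, 1], [0, 1, 0]]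

def Spec_liczba_wystapien_decyzyjnych (tab : List (List Int)) (out : List (String × List (Int × List (Int × Int)))) : Prop := out = liczba_wystapien_decyzyjnych_alt tab
instance (tab : List (List Int)) (out : List (String × List (Int × List (Int × Int)))) : Decidable (Spec_liczba_wystapien_decyzyjnych tab out) := by unfold Spec_liczba_wystapien_decyzyjnych; infer_instance

-- ===== CLAIM (what is proved, stated in full; the proofs are below) =====
def Claim_equal_liczba_wystapien_decyzyjnych : Prop := ∀ (tab : List (List Int)), Dom_liczba_wystapien_decyzyjnych tab → Pre_liczba_wystapien_decyzyjnych tab → Spec_liczba_wystapien_decyzyjnych tab (liczba_wystapien_decyzyjnych tab)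
-- ===== LEMMAS AND PROOFS =====

abbrev pvT2 : Type := PySem.Dict Int Int
abbrev pvT1 : Type := PySem.Dict Int pvT2
abbrev pvT0 : Type := PySem.Dict String pvT1

def pvName (i : Int) : String := "a" ++ PySem.Int.toStr (i + 1)
def pvZt (dec : List Int) : pvT2 := dec.foldl (fun m j => m.insert j 0) PySem.Dict.empty
def pvInit (dec row : List Int) : pvT1 :=
  (PySem.Set.ofList row).foldl (fun e i => e.insert i (pvZt dec)) PySem.Dict.empty
def pvInc (c : pvT1) (vd : Int × Int) : pvT1 :=
  c.modify vd.1 PySem.Dict.empty (fun m => m.modify vd.2 0 (· + 1))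
def pvG2 (t : pvT1) (v d : Int) : Int := (t.getD v PySem.Dict.empty).getD d 0
def pvStep (d : Int) (dec row : List Int) (t : pvT1) : pvT1 :=
  (PySem.List.enumerate dec).foldl (fun t r =>
    if r.2 == d then pvInc t ((PySem.List.pyGet? row r.1).getD 0, d) else t) t

-- injectivity of str(n) for naturals
lemma pv_digitChar_inj : ∀ a < 10, ∀ b < 10, Nat.digitChar a = Nat.digitChar b → a = b := by decide

lemma pv_toDigits10_inj : ∀ m n : Nat, Nat.toDigits 10 m = Nat.toDigits 10 n → m = n := by
  intro m
  induction m using Nat.strong_induction_on with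
  | _ m ih =>
    intro n h
    rw [Nat.toDigits_eq_if (b := 10) (n := m) (by norm_num)] at h
    rw [Nat.toDigits_eq_if (b := 10) (n := n) (by norm_num)] at h
    by_cases hm : m < 10 <;> by_cases hn : n < 10
    · rw [if_pos hm, if_pos hn] at h
      exact pv_digitChar_inj m hm n hn (List.cons_eq_cons.mp h).1
    · rw [if_pos hm, if_neg hn] at h
      have hl := congrArg List.length h
      simp only [List.length_append, List.length_cons, List.length_nil] at hl
      have hp : 0 < (Nat.toDigits 10 (n / 10)).length := Nat.length_toDigits_pos
      omega
    · rw [if_neg hm, if_pos hn] at h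
      have hl := congrArg List.length h
      simp only [List.length_append, List.length_cons, List.length_nil] at hl
      have hp : 0 < (Nat.toDigits 10 (m / 10)).length := Nat.length_toDigits_pos
      omega
    · rw [if_neg hm, if_neg hn] at h
      have hl := congrArg List.length h
      simp only [List.length_append, List.length_cons, List.length_nil] at hl
      obtain ⟨h1, h2⟩ := List.append_inj h (by omega)
      have hdiv : m / 10 = n / 10 := ih (m / 10) (by omega) _ h1
      have hmod : m % 10 = n % 10 :=
        pv_digitChar_inj _ (by omega) _ (by omega) (List.cons_eq_cons.mp h2).1
      omega

lemma pv_toStr_inj {i j : Int} (hi : 0 ≤ i) (hj : 0 ≤ j)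
    (h : (PySem.Int.toStr i).toList = (PySem.Int.toStr j).toList) : i = j := by
  rw [PySem.Int.toList_toStr, PySem.Int.toList_toStr] at h
  unfold PySem.Int.toChars at h
  rw [if_neg (by omega), if_neg (by omega)] at h
  have := pv_toDigits10_inj _ _ h
  omega

lemma pvName_inj {i j : Int} (hi : 0 ≤ i) (hj : 0 ≤ j) (h : pvName i = pvName j) : i = j := by
  unfold pvName at h
  have h' := congrArg String.toList h
  rw [String.toList_append, String.toList_append] at h'
  have := pv_toStr_inj (i := i + 1) (j := j + 1) (by omega) (by omega) (List.append_cancel_left h')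
  omega

lemma pvNames_nodup (head : List (List Int)) :
    ((PySem.List.enumerate head).map (fun q => pvName q.1)).Nodup := by
  have h1 : ((PySem.List.enumerate head).map (fun q => pvName q.1))
      = ((PySem.List.enumerate head).map (fun q => q.1)).map pvName := by
    rw [List.map_map]; rfl
  rw [h1, PySem.List.map_fst_enumerate]
  have h2 : ((0 : Int) + (head.length : Int)) = ((head.length : Nat) : Int) := by ring
  rw [h2, PySem.List.pyRange_zero_natCast]
  apply List.Nodup.map_on
  · intro x hx y hy hxy
    obtain ⟨a, ha, rfl⟩ := List.mem_map.mp hx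
    obtain ⟨b, hb, rfl⟩ := List.mem_map.mp hy
    have := pvName_inj (by positivity) (by positivity) hxy
    exact_mod_cast this
  · exact List.nodup_range.map (fun a b hab => by exact_mod_cast hab)

-- basic dict facts
lemma pv_insert_same {κ ν : Type} [BEq κ] [LawfulBEq κ] (d : PySem.Dict κ ν) (k : κ) (t : ν)
    (hnd : d.keys.Nodup) (h : d.get? k = some t) : d.insert k t = d := by
  have hmem : (k, t) ∈ d.items := PySem.Dict.mem_items_of_get?_eq_some d h
  have hc : d.contains k = true := by
    rw [PySem.Dict.contains_iff_mem_keys]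
    exact PySem.Dict.mem_keys_of_mem_items d hmem
  apply PySem.Dict.ext
  rw [PySem.Dict.items_insert_of_contains d t hc]
  apply List.map_congr_left ?_ |>.trans (List.map_id _)
  intro p hp
  by_cases hpk : p.1 = k
  · have hgp : d.get? p.1 = some p.2 := PySem.Dict.get?_of_mem_items d (by simpa using hp) hnd
    rw [hpk, h] at hgp
    have ht : t = p.2 := Option.some_inj.mp hgp
    obtain ⟨p1, p2⟩ := p
    simp only at hpk ht
    simp [hpk, ht]
  · simp [hpk]

-- a fold that conditionally modifies a single (present) key is an insert of the folded value
lemma pv_fold_modify_key {α : Type} (lst : List α) (p : α → Bool) (h : α → pvT1 → pvT1) :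
    ∀ (D : pvT0) (k : String) (t : pvT1), D.keys.Nodup → D.get? k = some t →
    lst.foldl (fun s r => if p r then s.modify k PySem.Dict.empty (h r) else s) D
      = D.insert k (lst.foldl (fun t r => if p r then h r t else t) t) := by
  induction lst with
  | nil => intro D k t hnd hget; exact (pv_insert_same D k t hnd hget).symm
  | cons r lst ih =>
    intro D k t hnd hget
    by_cases hp : p r
    · simp only [List.foldl_cons, hp, if_true]
      have hmod : D.modify k PySem.Dict.empty (h r) = D.insert k (h r t) := by
        unfold PySem.Dict.modify
        rw [PySem.Dict.getD_eq_get?_getD, hget]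
        rfl
      rw [hmod, ih _ k (h r t) ?_ (PySem.Dict.get?_insert_self D k (h r t))]
      · rw [PySem.Dict.insert_insert_self]
      · have hc : D.contains k = true := by
          rw [PySem.Dict.contains_iff_mem_keys]
          exact PySem.Dict.mem_keys_of_mem_items D (PySem.Dict.mem_items_of_get?_eq_some D hget)
        have : (D.insert k (h r t)).keys = D.keys := PySem.Dict.keys_insert_of_contains D _ hc
        rw [this]; exact hnd
    · simp only [List.foldl_cons, hp]
      exact ih D k t hnd hget

-- middle lemma: one pass of A's loop2 (fixed decision value d) over all rows, on an explicit dict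
lemma pvStep_def (d : Int) (dec row : List Int) (t : pvT1) :
    (PySem.List.enumerate dec).foldl (fun t r =>
      if r.2 == d then pvInc t ((PySem.List.pyGet? row r.1).getD 0, d) else t) t
    = pvStep d dec row t := rfl

lemma pv_middle (d : Int) (dec : List Int) :
    ∀ (l : List (Int × List Int)) (pre : List (String × pvT1)) (G : Int × List Int → pvT1),
    (pre.map Prod.fst ++ l.map (fun q => pvName q.1)).Nodup →
    l.foldl (fun s q =>
        (PySem.List.enumerate dec).foldl (fun s r =>
          if r.2 == d then
            s.modify (pvName q.1) PySem.Dict.empty (fun m =>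
              pvInc m ((PySem.List.pyGet? q.2 r.1).getD 0, d))
          else s) s)
      (PySem.Dict.mk (pre ++ l.map (fun q => (pvName q.1, G q))))
      = PySem.Dict.mk (pre ++ l.map (fun q => (pvName q.1, pvStep d dec q.2 (G q)))) := by
  intro l
  induction l with
  | nil => intro pre G _; rfl
  | cons q0 l ih =>
    intro pre G hnd
    have hnd' : (PySem.Dict.mk (pre ++ (q0 :: l).map (fun q => (pvName q.1, G q)))).keys.Nodup := by
      show (((pre ++ (q0 :: l).map (fun q => (pvName q.1, G q)))).map Prod.fst).Nodup
      simp only [List.map_append, List.map_map]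
      exact hnd
    have hget : (PySem.Dict.mk (pre ++ (q0 :: l).map (fun q => (pvName q.1, G q)))).get? (pvName q0.1)
        = some (G q0) := by
      apply PySem.Dict.get?_of_mem_items _ ?_ hnd'
      show (pvName q0.1, G q0) ∈ _
      simp
    have hnot_pre : ∀ x ∈ pre, x.1 ≠ pvName q0.1 := by
      intro x hx heq
      rw [List.nodup_append] at hnd
      exact hnd.2.2 x.1 (List.mem_map_of_mem hx) (pvName q0.1) (by simp) heq
    have hnot_l : ∀ q ∈ l, pvName q.1 ≠ pvName q0.1 := by
      intro q hq heq
      rw [List.nodup_append] at hnd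
      have h2 := hnd.2.1
      simp only [List.map_cons, List.nodup_cons] at h2
      exact h2.1 (heq ▸ List.mem_map_of_mem hq)

    simp only [List.foldl_cons]
    rw [pv_fold_modify_key (PySem.List.enumerate dec) (fun r => r.2 == d)
        (fun r m => pvInc m ((PySem.List.pyGet? q0.2 r.1).getD 0, d)) _ _ _ hnd' hget]
    rw [pvStep_def]
    have hins : (PySem.Dict.mk (pre ++ (q0 :: l).map (fun q => (pvName q.1, G q)))).insert
          (pvName q0.1) (pvStep d dec q0.2 (G q0))
        = PySem.Dict.mk ((pre ++ [(pvName q0.1, pvStep d dec q0.2 (G q0))]) ++ l.map (fun q => (pvName q.1, G q))) := by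
      have hc : (PySem.Dict.mk (pre ++ (q0 :: l).map (fun q => (pvName q.1, G q)))).contains (pvName q0.1) = true := by
        rw [PySem.Dict.contains_iff_mem_keys]
        exact PySem.Dict.mem_keys_of_mem_items _ (PySem.Dict.mem_items_of_get?_eq_some _ hget)
      apply PySem.Dict.ext
      rw [PySem.Dict.items_insert_of_contains _ _ hc]
      show (pre ++ (q0 :: l).map (fun q => (pvName q.1, G q))).map
          (fun p => if (p.1 == pvName q0.1) = true then (pvName q0.1, pvStep d dec q0.2 (G q0)) else p) = _
      rw [List.map_append, List.map_cons, List.map_cons]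
      have hpre : pre.map (fun p => if (p.1 == pvName q0.1) = true then (pvName q0.1, pvStep d dec q0.2 (G q0)) else p) = pre := by
        apply (List.map_congr_left ?_).trans (List.map_id _)
        intro x hx
        simp [hnot_pre x hx]
      have hq0h : (if ((pvName q0.1, G q0).1 == pvName q0.1) = true then (pvName q0.1, pvStep d dec q0.2 (G q0)) else (pvName q0.1, G q0)) = (pvName q0.1, pvStep d dec q0.2 (G q0)) := by simp
      have hrest : (l.map (fun q => (pvName q.1, G q))).map
          (fun p => if (p.1 == pvName q0.1) = true then (pvName q0.1, pvStep d dec q0.2 (G q0)) else p)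
          = l.map (fun q => (pvName q.1, G q)) := by
        rw [List.map_map]
        apply List.map_congr_left
        intro q hq
        simp [hnot_l q hq]
      rw [hpre, hq0h, hrest]
      simp
    rw [hins]
    rw [ih (pre ++ [(pvName q0.1, pvStep d dec q0.2 (G q0))]) G
        (by simpa [List.nodup_append, List.append_assoc] using hnd)]
    simp

-- A's whole loop2, for any list of decision values ds
lemma pv_loop2 (dec : List Int) (head : List (List Int)) :
    ∀ (ds : List Int) (G : Int × List Int → pvT1),
    ds.foldl (fun s d =>
        (PySem.List.enumerate head).foldl (fun s q =>
          (PySem.List.enumerate dec).foldl (fun s r =>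
            if r.2 == d then
              s.modify (pvName q.1) PySem.Dict.empty (fun m =>
                pvInc m ((PySem.List.pyGet? q.2 r.1).getD 0, d))
            else s) s) s)
      (PySem.Dict.mk ((PySem.List.enumerate head).map (fun q => (pvName q.1, G q))))
      = PySem.Dict.mk ((PySem.List.enumerate head).map (fun q =>
          (pvName q.1, ds.foldl (fun t d => pvStep d dec q.2 t) (G q)))) := by
  intro ds
  induction ds with
  | nil => intro G; rfl
  | cons d0 ds ih =>
    intro G
    simp only [List.foldl_cons]
    have hmid := pv_middle d0 dec (PySem.List.enumerate head) [] G (by simpa using pvNames_nodup head)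
    simp only [List.nil_append] at hmid
    rw [hmid]
    rw [ih (fun q => pvStep d0 dec q.2 (G q))]

-- counting characterization at the two inner levels
lemma pvG2_foldl (ps : List (Int × Int)) :
    ∀ (t : pvT1) (v d : Int),
    pvG2 (ps.foldl pvInc t) v d = pvG2 t v d + (ps.count (v, d) : Int) := by
  induction ps with
  | nil => intro t v d; simp
  | cons p ps ih =>
    intro t v d
    have hstep : pvG2 (pvInc t p) v d = pvG2 t v d + (if p = (v, d) then 1 else 0) := by
      obtain ⟨a, b⟩ := p
      unfold pvG2 pvInc
      simp only
      rw [PySem.Dict.getD_modify]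
      by_cases hv : v = a
      · subst hv
        rw [if_pos rfl, PySem.Dict.getD_modify]
        by_cases hd : d = b
        · subst hd
          simp
        · rw [if_neg hd, if_neg (fun h => hd (by injection h with h1 h2; exact h2.symm))]
          ring
      · rw [if_neg hv, if_neg (fun h => hv (by injection h with h1 h2; exact h1.symm))]
        ring
    simp only [List.foldl_cons]
    rw [ih, hstep, List.count_cons]
    by_cases h : p = (v, d)
    · rw [if_pos h, if_pos (by simp [h])]
      omega
    · rw [if_neg h, if_neg (by simp [h])]
      omega

lemma pv_keys_foldl_inc (ps : List (Int × Int)) :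
    ∀ (t : pvT1), (∀ p ∈ ps, t.contains p.1 = true ∧ (t.getD p.1 PySem.Dict.empty).contains p.2 = true) →
    ((ps.foldl pvInc t).keys = t.keys ∧
      ∀ v, ((ps.foldl pvInc t).getD v PySem.Dict.empty).keys = (t.getD v PySem.Dict.empty).keys) := by
  induction ps with
  | nil => intro t _; exact ⟨rfl, fun _ => rfl⟩
  | cons p ps ih =>
    intro t hp
    obtain ⟨hc1, hc2⟩ := hp p (by simp)
    have hkeys : (pvInc t p).keys = t.keys := by
      unfold pvInc PySem.Dict.modify
      exact PySem.Dict.keys_insert_of_contains t _ hc1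
    have hinner : ∀ v, ((pvInc t p).getD v PySem.Dict.empty).keys = (t.getD v PySem.Dict.empty).keys := by
      intro v
      unfold pvInc
      rw [PySem.Dict.getD_modify]
      by_cases hv : v = p.1
      · rw [if_pos hv, hv]
        unfold PySem.Dict.modify
        exact PySem.Dict.keys_insert_of_contains _ _ hc2
      · rw [if_neg hv]
    have hpres : ∀ q ∈ ps, (pvInc t p).contains q.1 = true ∧ ((pvInc t p).getD q.1 PySem.Dict.empty).contains q.2 = true := by
      intro q hq
      obtain ⟨h1, h2⟩ := hp q (by simp [hq])
      constructor
      · unfold pvInc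
        rw [PySem.Dict.contains_modify]
        simp [h1]
      · rw [PySem.Dict.contains_iff_mem_keys, hinner q.1, ← PySem.Dict.contains_iff_mem_keys]
        exact h2
    obtain ⟨k1, k2⟩ := ih (pvInc t p) hpres
    exact ⟨by simp only [List.foldl_cons]; rw [k1, hkeys],
           fun v => by simp only [List.foldl_cons]; rw [k2 v, hinner v]⟩

-- two-level extensionality
lemma pvT1_ext (t u : pvT1) (hnk : t.keys.Nodup)
    (hk : t.keys = u.keys)
    (hkv : ∀ v, (t.getD v PySem.Dict.empty).keys = (u.getD v PySem.Dict.empty).keys)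
    (hnv : ∀ v, (t.getD v PySem.Dict.empty).keys.Nodup)
    (hd : ∀ v d, pvG2 t v d = pvG2 u v d) : t = u := by
  apply PySem.Dict.ext
  rw [PySem.Dict.items_eq_map_keys t hnk PySem.Dict.empty,
      PySem.Dict.items_eq_map_keys u (hk ▸ hnk) PySem.Dict.empty, ← hk]
  apply List.map_congr_left
  intro v _
  congr 1
  apply PySem.Dict.ext
  rw [PySem.Dict.items_eq_map_keys _ (hnv v) 0,
      PySem.Dict.items_eq_map_keys _ (hkv v ▸ hnv v) 0, ← hkv v]
  apply List.map_congr_left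
  intro d _
  exact congrArg _ (hd v d)

-- structure of the initial tables
lemma pv_keys_zt (dec : List Int) : (pvZt dec).keys = PySem.Set.ofList dec := by
  unfold pvZt
  suffices h : ∀ xs (m : pvT2), m.keys.Nodup →
      (xs.foldl (fun m j => m.insert j 0) m).keys = PySem.Set.update m.keys xs by
    have := h dec PySem.Dict.empty (by simp [PySem.Dict.keys_empty])
    rw [this, PySem.Dict.keys_empty]
    exact PySem.Set.update_nil_left dec
  intro xs
  induction xs with
  | nil => intro m _; rfl
  | cons x xs ih =>
    intro m hnd
    simp only [List.foldl_cons]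
    rw [PySem.Set.update_cons]
    by_cases hc : m.contains x = true
    · rw [ih _ (by rw [PySem.Dict.keys_insert_of_contains m 0 hc]; exact hnd)]
      rw [PySem.Dict.keys_insert_of_contains m 0 hc,
          PySem.Set.add_of_mem ((PySem.Dict.contains_iff_mem_keys m x).mp hc)]
    · have hcf : m.contains x = false := by simpa using hc
      rw [ih _ ?_]
      · rw [PySem.Dict.keys_insert_of_not_contains m 0 hcf,
            PySem.Set.add_of_not_mem (fun hmem => by simp [(PySem.Dict.contains_iff_mem_keys m x).mpr hmem] at hcf)]
      · rw [PySem.Dict.keys_insert_of_not_contains m 0 hcf]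
        refine List.Nodup.append hnd (by simp) ?_
        intro a ha hb
        simp at hb
        subst hb
        exact absurd ((PySem.Dict.contains_iff_mem_keys m a).mpr ha) (by simp [hcf])

lemma pv_init_items (dec row : List Int) :
    (pvInit dec row).items = (PySem.Set.ofList row).map (fun v => (v, pvZt dec)) := by
  unfold pvInit
  have := PySem.Dict.items_foldl_insert_fresh (PySem.Set.ofList row) id (fun _ => pvZt dec)
      PySem.Dict.empty (fun a _ => PySem.Dict.contains_empty a)
      (by simp only [List.map_id]; exact PySem.Set.nodup_ofList row)
  simpa using this

lemma pv_init_keys (dec row : List Int) : (pvInit dec row).keys = PySem.Set.ofList row := by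
  show (pvInit dec row).items.map Prod.fst = _
  rw [pv_init_items, List.map_map]
  exact (List.map_congr_left (fun a _ => rfl)).trans (List.map_id _)

lemma pv_init_getD (dec row : List Int) (v : Int) (hv : v ∈ row) :
    (pvInit dec row).getD v PySem.Dict.empty = pvZt dec := by
  apply PySem.Dict.getD_of_mem_items
  · rw [pv_init_items]
    exact List.mem_map_of_mem ((PySem.Set.mem_ofList _ _).mpr hv)
  · rw [pv_init_keys]; exact PySem.Set.nodup_ofList row

lemma pv_init_getD_not_mem (dec row : List Int) (v : Int) (hv : ¬ v ∈ row) :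
    (pvInit dec row).getD v PySem.Dict.empty = PySem.Dict.empty := by
  apply PySem.Dict.getD_of_not_contains
  rw [← Bool.not_eq_true]
  intro hc
  rw [PySem.Dict.contains_iff_mem_keys, pv_init_keys, PySem.Set.mem_ofList] at hc
  exact hv hc

-- counts: grouping by decision value is a permutation-invariant recount
lemma pv_count_flatMap (Z : List (Int × Int)) (x : Int × Int) :
    ∀ (ds : List Int), ds.Nodup →
    ((ds.flatMap (fun d => Z.filter (fun z => z.2 == d))).count x : Nat)
      = if x.2 ∈ ds then Z.count x else 0 := by
  intro ds
  induction ds with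
  | nil => intro _; simp
  | cons d0 ds ih =>
    intro hnd
    rw [List.flatMap_cons, List.count_append, ih (List.nodup_cons.mp hnd).2]
    have hfil : (List.filter (fun z => z.2 == d0) Z).count x = if x.2 = d0 then Z.count x else 0 := by
      rw [List.count_eq_countP, List.countP_filter]
      by_cases hx : x.2 = d0
      · rw [if_pos hx, List.count_eq_countP]
        apply List.countP_congr
        intro a _
        by_cases ha : a = x
        · subst ha; simp [hx]
        · simp [ha]
      · rw [if_neg hx, List.countP_eq_zero]
        intro a _ hcontra
        simp at hcontra
        obtain ⟨h1, h2⟩ := hcontra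
        subst h1
        exact hx h2
    rw [hfil]
    by_cases hx0 : x.2 = d0
    · have hd0 : d0 ∉ ds := by
        rw [← hx0]
        exact fun hmem => (List.nodup_cons.mp hnd).1 (hx0 ▸ hmem)
      simp [hx0, hd0]
    · by_cases hxs : x.2 ∈ ds <;> simp [hx0, hxs]

-- the map sending A's enumerate-index access to the zipped pair
lemma pv_enum_zip (dec : List Int) :
    ∀ (row : List Int) (s : Nat), s + dec.length ≤ row.length →
    (PySem.List.enumerate dec (s : Int)).map (fun r => ((PySem.List.pyGet? row r.1).getD 0, r.2))
      = (row.drop s).zip dec := by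
  induction dec with
  | nil => intro row s _; simp [PySem.List.enumerate]
  | cons d dec ih =>
    intro row s hlen
    rw [PySem.List.enumerate_cons]
    have hs : s < row.length := by simp at hlen; omega
    rw [List.drop_eq_getElem_cons hs]
    simp only [List.map_cons, List.zip_cons_cons]
    congr 1
    · show ((PySem.List.pyGet? row (s : Int)).getD 0, d) = (row[s], d)
      congr 1
      show PySem.List.pyGetD row (s : Int) 0 = row[s]
      rw [PySem.List.pyGetD_of_nonneg row 0 (by positivity)]
      simp [List.getD_eq_getElem?_getD, List.getElem?_eq_getElem hs]
    · have : ((s : Int) + 1) = ((s + 1 : Nat) : Int) := by push_cast; ring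
      rw [this, ih row (s + 1) (by simp at hlen ⊢; omega)]

-- A's per-row accumulation equals a single fold of pvInc over the grouped list
lemma pv_rowA_flat (dec row : List Int) (hlen : dec.length ≤ row.length) (ds : List Int) :
    ds.foldl (fun t d => pvStep d dec row t) (pvInit dec row)
      = (ds.flatMap (fun d => (row.zip dec).filter (fun z => z.2 == d))).foldl pvInc (pvInit dec row) := by
  rw [List.foldl_flatMap]
  apply PySem.List.foldl_congr_mem
  intro t d _
  unfold pvStep
  rw [PySem.List.foldl_if_eq_foldl_filter (fun (r : Int × Int) => r.2 == d)
      (fun (t : pvT1) (r : Int × Int) => pvInc t ((PySem.List.pyGet? row r.1).getD 0, d))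
      (PySem.List.enumerate dec) t]
  have hmap : ((PySem.List.enumerate dec).filter (fun r => r.2 == d)).map
        (fun r => ((PySem.List.pyGet? row r.1).getD 0, r.2))
      = (row.zip dec).filter (fun z => z.2 == d) := by
    have hez := pv_enum_zip dec row 0 (by simpa using hlen)
    rw [List.drop_zero] at hez
    norm_num at hez
    rw [← hez, List.filter_map]
    rfl
  calc List.foldl (fun t r => pvInc t ((PySem.List.pyGet? row r.1).getD 0, d)) t
        ((PySem.List.enumerate dec).filter (fun r => r.2 == d))
      = List.foldl pvInc t (((PySem.List.enumerate dec).filter (fun r => r.2 == d)).map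
          (fun r => ((PySem.List.pyGet? row r.1).getD 0, r.2))) := by
        rw [List.foldl_map]
        apply PySem.List.foldl_congr_mem
        intro t' r hr
        have : r.2 = d := by simpa using (List.mem_filter.mp hr).2
        rw [this]
    _ = List.foldl pvInc t ((row.zip dec).filter (fun z => z.2 == d)) := by rw [hmap]

-- presence of all zipped pairs in the initial table
lemma pv_zip_presence (dec row : List Int) (z : Int × Int) (hz : z ∈ row.zip dec) :
    (pvInit dec row).contains z.1 = true ∧
      ((pvInit dec row).getD z.1 PySem.Dict.empty).contains z.2 = true := by
  obtain ⟨zv, zd⟩ := z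
  obtain ⟨h1, h2⟩ := List.of_mem_zip hz
  constructor
  · rw [PySem.Dict.contains_iff_mem_keys, pv_init_keys, PySem.Set.mem_ofList]
    exact h1
  · rw [pv_init_getD dec row zv h1, PySem.Dict.contains_iff_mem_keys, pv_keys_zt,
        PySem.Set.mem_ofList]
    exact h2

-- the per-row equality: A's grouped count = B's single zip pass
lemma pv_row_eq (dec row : List Int) (hlen : dec.length ≤ row.length) :
    (PySem.Set.ofList dec).foldl (fun t d => pvStep d dec row t) (pvInit dec row)
      = (row.zip dec).foldl pvInc (pvInit dec row) := by
  rw [pv_rowA_flat dec row hlen]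
  set Z := row.zip dec with hZ
  set L := (PySem.Set.ofList dec).flatMap (fun d => Z.filter (fun z => z.2 == d)) with hL
  have hLsub : ∀ p ∈ L, p ∈ Z := by
    intro p hp
    rw [hL, List.mem_flatMap] at hp
    obtain ⟨d, _, hpd⟩ := hp
    exact (List.mem_filter.mp hpd).1
  have hpresL : ∀ p ∈ L, (pvInit dec row).contains p.1 = true ∧
      ((pvInit dec row).getD p.1 PySem.Dict.empty).contains p.2 = true :=
    fun p hp => pv_zip_presence dec row p (hLsub p hp)
  have hpresZ : ∀ p ∈ Z, (pvInit dec row).contains p.1 = true ∧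
      ((pvInit dec row).getD p.1 PySem.Dict.empty).contains p.2 = true :=
    fun p hp => pv_zip_presence dec row p hp
  obtain ⟨kL1, kL2⟩ := pv_keys_foldl_inc L (pvInit dec row) hpresL
  obtain ⟨kZ1, kZ2⟩ := pv_keys_foldl_inc Z (pvInit dec row) hpresZ
  apply pvT1_ext
  · rw [kL1, pv_init_keys]; exact PySem.Set.nodup_ofList row
  · rw [kL1, kZ1]
  · intro v; rw [kL2 v, kZ2 v]
  · intro v
    rw [kL2 v]
    by_cases hv : v ∈ row
    · rw [pv_init_getD dec row v hv, pv_keys_zt]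
      exact PySem.Set.nodup_ofList dec
    · rw [pv_init_getD_not_mem dec row v hv]
      simp [PySem.Dict.keys_empty]
  · intro v d
    rw [pvG2_foldl, pvG2_foldl]
    congr 1
    have hcount : (L.count (v, d) : Nat) = Z.count (v, d) := by
      rw [hL, pv_count_flatMap Z (v, d) (PySem.Set.ofList dec) (PySem.Set.nodup_ofList dec)]
      by_cases hd : d ∈ dec
      · simp [PySem.Set.mem_ofList, hd]
      · have : (d : Int) ∉ PySem.Set.ofList dec := fun h => hd ((PySem.Set.mem_ofList _ _).mp h)
        rw [if_neg (by simpa using this)]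
        rw [eq_comm, List.count_eq_zero]
        intro hmem
        exact hd (List.of_mem_zip hmem).2
    exact_mod_cast congrArg (fun n : Nat => (n : Int)) hcount

-- the initial dict of A's loop1 / B's inserts, as an explicit dict
lemma pv_D0_eq (dec : List Int) (head : List (List Int)) :
    (PySem.List.enumerate head).foldl (fun s p =>
        s.insert (pvName p.1) (pvInit dec p.2)) PySem.Dict.empty
      = PySem.Dict.mk ((PySem.List.enumerate head).map (fun q => (pvName q.1, pvInit dec q.2))) := by
  apply PySem.Dict.ext
  rw [PySem.Dict.items_foldl_insert_fresh (PySem.List.enumerate head)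
      (fun q => pvName q.1) (fun q => pvInit dec q.2) PySem.Dict.empty
      (fun a _ => PySem.Dict.contains_empty _) (pvNames_nodup head)]
  rfl

lemma pv_Bout_eq (dec : List Int) (head : List (List Int)) :
    (PySem.List.enumerate head).foldl (fun o p =>
        o.insert (pvName p.1) ((p.2.zip dec).foldl pvInc (pvInit dec p.2))) PySem.Dict.empty
      = PySem.Dict.mk ((PySem.List.enumerate head).map (fun q =>
          (pvName q.1, (q.2.zip dec).foldl pvInc (pvInit dec q.2)))) := by
  apply PySem.Dict.ext
  rw [PySem.Dict.items_foldl_insert_fresh (PySem.List.enumerate head)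
      (fun q => pvName q.1) (fun q => (q.2.zip dec).foldl pvInc (pvInit dec q.2)) PySem.Dict.empty
      (fun a _ => PySem.Dict.contains_empty _) (pvNames_nodup head)]
  rfl

-- the two programs, phrased over dropLast and the decision row
lemma pv_main (dec : List Int) (head : List (List Int))
    (hlen : ∀ row ∈ head, dec.length ≤ row.length) :
    (((PySem.Set.ofList dec).foldl (fun s d =>
        (PySem.List.enumerate head).foldl (fun s q =>
          (PySem.List.enumerate dec).foldl (fun s r =>
            if r.2 == d then
              s.modify (pvName q.1) PySem.Dict.empty (fun m =>
                pvInc m ((PySem.List.pyGet? q.2 r.1).getD 0, d))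
            else s) s) s)
      ((PySem.List.enumerate head).foldl (fun s p =>
        s.insert (pvName p.1) (pvInit dec p.2)) PySem.Dict.empty)).items.map
          (fun p => (p.1, p.2.items.map (fun q => (q.1, q.2.items)))))
    = (((PySem.List.enumerate head).foldl (fun o p =>
        o.insert (pvName p.1) ((p.2.zip dec).foldl pvInc (pvInit dec p.2))) PySem.Dict.empty).items.map
          (fun p => (p.1, p.2.items.map (fun q => (q.1, q.2.items))))) := by
  rw [pv_D0_eq, pv_Bout_eq, pv_loop2]
  have hlists : (PySem.List.enumerate head).map (fun q =>
        (pvName q.1, (PySem.Set.ofList dec).foldl (fun t d => pvStep d dec q.2 t) (pvInit dec q.2)))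
      = (PySem.List.enumerate head).map (fun q =>
        (pvName q.1, (q.2.zip dec).foldl pvInc (pvInit dec q.2))) := by
    apply List.map_congr_left
    intro q hq
    have hmem : q.2 ∈ head := by
      obtain ⟨k, hk, rfl⟩ := (PySem.List.mem_enumerate_iff _ _ _).mp hq
      exact List.getElem_mem hk
    rw [pv_row_eq dec q.2 (hlen q.2 hmem)]
  rw [show (PySem.Dict.mk ((PySem.List.enumerate head).map (fun q =>
        (pvName q.1, (PySem.Set.ofList dec).foldl (fun t d => pvStep d dec q.2 t) (pvInit dec q.2)))))
      = (PySem.Dict.mk ((PySem.List.enumerate head).map (fun q =>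
        (pvName q.1, (q.2.zip dec).foldl pvInc (pvInit dec q.2))))) from congrArg PySem.Dict.mk hlists]

-- ===== VERDICT (by name: the statement is the Claim_ definition above) =====
theorem liczba_wystapien_decyzyjnych_spec : Claim_equal_liczba_wystapien_decyzyjnych := by
  intro tab _ hpre
  obtain ⟨hne, hlenPre⟩ := hpre
  have hsliceA : PySem.List.slice tab none (some ((tab.length : Int) - 1)) = tab.dropLast := by
    have hpos : 1 ≤ tab.length := List.length_pos_iff.mpr hne
    have : ((tab.length : Int) - 1) = ((tab.length - 1 : Nat) : Int) := by push_cast [hpos]; ring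
    rw [this, PySem.List.slice_to_natCast, ← List.dropLast_eq_take]
  have hlen' : ∀ row ∈ tab.dropLast, (tab.getLast?.getD []).length ≤ row.length := hlenPre
  unfold Spec_liczba_wystapien_decyzyjnych
  show liczba_wystapien_decyzyjnych tab = liczba_wystapien_decyzyjnych_alt tab
  unfold liczba_wystapien_decyzyjnych liczba_wystapien_decyzyjnych_alt
  simp only [PySem.List.dedup_eq_ofList, PySem.List.slice_to_neg_one, hsliceA,
    PySem.List.pyGet?_neg_one]
  exact pv_main (tab.getLast?.getD []) tab.dropLast hlen'
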